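-- pv_equiv track=rewrite | github.com/thepeacefulprogrammer/maximal-spatio-take-2 | algorithms/mdcop.py | find_maximal
-- ===== SOURCE A (Python) =====
-- from itertools import groupby
--
-- def is_subtuple(a,b):
--     if len(a)==0:
--         return True
--     if len(b)==0:
--         return False
--     pa=0
--     pb=0
--     while pa<len(a) and pb<len(b):
--         while pb<len(b) and a[pa]>b[pb]: #WARNING! partial evaluation of boolean equations is required for this to work correctly
--             pb=pb+1
--         if pb==len(b):
--             return False
--         if a[pa]!=b[pb]:
--             return False
--         pa=pa+1
--     return True
--
-- def find_maximal(colocs):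
--     sorted_colocs=sorted(colocs,key=lambda x:len(x),reverse=True)
--     results=[]
--     for k,g in groupby(sorted_colocs,lambda x:len(x)):
--         temp=[]
--         for c in g:
--             if not any(is_subtuple(c, x) for x in results):
--                 temp.append(c)
--         results.extend(temp)
--     return results
-- ===== SOURCE B (Python) =====
-- def is_subtuple(a, b):
--     # same containment test as A's two-pointer loop, written as structural recursion
--     if not a:
--         return True
--     if not b:
--         return False
--     if b[0] < a[0]:
--         return is_subtuple(a, b[1:])
--     if a[0] == b[0]:
--         return is_subtuple(a[1:], b)
--     return False
--
-- def find_maximal(colocs):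
--     # direct filter over the length-descending stable sort: keep c iff no
--     # strictly longer tuple in the list contains it (is_subtuple is transitive,
--     # so scanning all longer tuples equals A's accepted-results scan)
--     s = sorted(colocs, key=len, reverse=True)
--     return [c for c in s if not any(len(x) > len(c) and is_subtuple(c, x) for x in s)]
-- ===== Notes on version B (the rewrite author's own statement) =====
-- stated objective: simpler
-- what changed: Replaced the groupby/temp/results accumulator machinery by a single stable length-descending sort followed by a direct filter that keeps c iff no strictly longer tuple of the whole list contains it (valid because is_subtuple is transitive), with the helper rewritten as structural recursion.
import Mathlib
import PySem

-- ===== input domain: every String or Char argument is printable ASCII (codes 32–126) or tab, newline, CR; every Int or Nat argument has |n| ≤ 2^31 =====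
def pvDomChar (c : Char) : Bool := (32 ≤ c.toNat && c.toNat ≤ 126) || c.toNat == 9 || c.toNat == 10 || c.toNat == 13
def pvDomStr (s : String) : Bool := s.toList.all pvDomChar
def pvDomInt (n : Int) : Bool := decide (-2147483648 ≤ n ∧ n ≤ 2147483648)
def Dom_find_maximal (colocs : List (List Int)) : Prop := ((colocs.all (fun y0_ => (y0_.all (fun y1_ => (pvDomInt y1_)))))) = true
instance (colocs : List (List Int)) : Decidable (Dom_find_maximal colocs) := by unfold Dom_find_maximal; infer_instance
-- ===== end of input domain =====

-- B replaces A's groupby/temp/accumulator machinery by one sort plus a direct filter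
-- against all strictly longer tuples (objective: simpler; same asymptotic cost).

-- ===== PORT A =====
-- is_subtuple: the two-pointer while loop ported as structural recursion on the two
-- suffixes a[pa:], b[pb:] — each step advances exactly as the Python loop does
-- (skip b while a[pa] > b[pb]; mismatch → False; match → advance pa keeping pb).
def sub : List Int → List Int → Bool
  | [], _ => true
  | _ :: _, [] => false
  | x :: a, y :: b =>
    if y < x then sub (x :: a) b
    else if x = y then sub a (y :: b)
    else false
termination_by a b => a.length + b.length

-- itertools.groupby(·, key=len): maximal runs of consecutive equal-length elements
def runs : List (List Int) → List (List (List Int))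
  | [] => []
  | x :: xs =>
    (x :: xs.takeWhile (fun y => y.length == x.length)) ::
      runs (xs.dropWhile (fun y => y.length == x.length))
termination_by l => l.length
decreasing_by
  simp only [List.length_cons]
  exact Nat.lt_succ_of_le (List.length_dropWhile_le _ _)

def find_maximal (colocs : List (List Int)) : List (List Int) :=
  let sorted_colocs := PySem.List.sorted colocs (fun x => (x.length : Int)) true
  (runs sorted_colocs).foldl
    (fun results g =>
      results ++ g.foldl
        (fun temp c => if results.any (fun x => sub c x) then temp else temp ++ [c]) [])
    []

-- ===== PORT B =====
def find_maximal_alt (colocs : List (List Int)) : List (List Int) :=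
  let s := PySem.List.sorted colocs (fun x => (x.length : Int)) true
  s.filter (fun c => !(s.any (fun x => decide (c.length < x.length) && sub c x)))

-- ===== PRECONDITION & SPEC =====
def Spec_find_maximal (colocs : List (List Int)) (out : List (List Int)) : Prop := out = find_maximal_alt colocs
instance (colocs : List (List Int)) (out : List (List Int)) : Decidable (Spec_find_maximal colocs out) := by unfold Spec_find_maximal; infer_instance

-- ===== CLAIM (what is proved, stated in full; the proofs are below) =====
def Claim_equal_find_maximal : Prop := ∀ (colocs : List (List Int)), Dom_find_maximal colocs → Spec_find_maximal colocs (find_maximal colocs)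

-- ===== LEMMAS AND PROOFS =====

-- B's keep-condition, named for the proofs
def keepK (L : List (List Int)) (c : List Int) : Bool :=
  !(L.any (fun x => decide (c.length < x.length) && sub c x))

-- A's outer loop, named for the proofs
def loopA (groups : List (List (List Int))) (results : List (List Int)) : List (List Int) :=
  groups.foldl
    (fun results g =>
      results ++ g.foldl
        (fun temp c => if results.any (fun x => sub c x) then temp else temp ++ [c]) [])
    results

theorem sub_trans : ∀ (n : Nat) (a b c : List Int),
    a.length + b.length + c.length ≤ n →
    sub a b = true → sub b c = true → sub a c = true := by
  intro n
  induction n with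
  | zero =>
    intro a b c hlen hab hbc
    match a, b, c with
    | [], _, _ => simp [sub]
    | _ :: _, _, _ => simp at hlen
  | succ n ih =>
    intro a b c hlen hab hbc
    match a, b, c with
    | [], _, _ => simp [sub]
    | _ :: _, [], _ => simp [sub] at hab
    | _ :: _, _ :: _, [] => simp [sub] at hbc
    | x :: a', y :: b', z :: c' =>
      by_cases h1 : z < y
      · have hbc' : sub (y :: b') c' = true := by
          rw [sub] at hbc; simpa [h1] using hbc
        have hxy : y ≤ x := by
          rw [sub] at hab
          by_cases h2 : y < x
          · exact le_of_lt h2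
          · by_cases h3 : x = y
            · exact le_of_eq h3.symm
            · simp [h2, h3] at hab
        have hzx : z < x := lt_of_lt_of_le h1 hxy
        have := ih (x :: a') (y :: b') c'
          (by simp at hlen ⊢; omega) hab hbc'
        rw [sub]; simpa [hzx] using this
      · by_cases h2 : y = z
        · have hbc' : sub b' (z :: c') = true := by
            rw [sub] at hbc; simpa [h1, h2] using hbc
          rw [sub] at hab
          by_cases h3 : y < x
          · have hab' : sub (x :: a') b' = true := by simpa [h3] using hab
            exact ih (x :: a') b' (z :: c') (by simp at hlen ⊢; omega) hab' hbc'
          · by_cases h4 : x = y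
            · have hab' : sub a' (y :: b') = true := by simpa [h3, h4] using hab
              have := ih a' (y :: b') (z :: c')
                (by simp at hlen ⊢; omega) hab' hbc
              rw [sub]
              have hxz : x = z := h4.trans h2
              simpa [hxz, lt_irrefl] using this
            · simp [h3, h4] at hab
        · rw [sub] at hbc; simp [h1, h2] at hbc

-- length of a filter is monotone in the predicate (restricted to members)
theorem filter_len_le {α : Type} (p q : α → Bool) :
    ∀ (L : List α), (∀ z ∈ L, q z = true → p z = true) →
    (L.filter q).length ≤ (L.filter p).length := by
  intro L
  induction L with
  | nil => intro _; simp
  | cons a L ihl =>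
    intro h
    have ht := ihl (fun z hz => h z (List.mem_cons_of_mem a hz))
    by_cases hq : q a = true
    · have hp := h a (List.mem_cons_self) hq
      simp [List.filter, hq, hp]; omega
    · simp only [Bool.not_eq_true] at hq
      by_cases hp : p a = true
      · simp [List.filter, hq, hp]; omega
      · simp only [Bool.not_eq_true] at hp
        simp [List.filter, hq, hp]; exact ht

theorem filter_len_lt {α : Type} (p q : α → Bool) :
    ∀ (L : List α), (∀ z ∈ L, q z = true → p z = true) →
    ∀ y ∈ L, p y = true → q y = false →
    (L.filter q).length < (L.filter p).length := by
  intro L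
  induction L with
  | nil => intro _ y hy; simp at hy
  | cons a L ihl =>
    intro h y hy hpy hqy
    have hmono := filter_len_le p q L (fun z hz => h z (List.mem_cons_of_mem a hz))
    rcases List.mem_cons.mp hy with rfl | hyL
    · simp [List.filter, hqy, hpy]; omega
    · have ht := ihl (fun z hz => h z (List.mem_cons_of_mem a hz)) y hyL hpy hqy
      by_cases hq : q a = true
      · have hp := h a (List.mem_cons_self) hq
        simp [List.filter, hq, hp]; omega
      · simp only [Bool.not_eq_true] at hq
        by_cases hp : p a = true
        · simp [List.filter, hq, hp]; omega
        · simp only [Bool.not_eq_true] at hp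
          simp [List.filter, hq, hp]; exact ht

-- if some member of L contains c, then some KEPT member of L contains c
theorem exists_kept (L : List (List Int)) (c : List Int) :
    ∀ (n : Nat) (x : List Int),
      (L.filter (fun z => decide (x.length < z.length))).length ≤ n →
      x ∈ L → sub c x = true →
      ∃ x' ∈ L, keepK L x' = true ∧ sub c x' = true := by
  intro n
  induction n with
  | zero =>
    intro x hm hx hcx
    by_cases hk : keepK L x = true
    · exact ⟨x, hx, hk, hcx⟩
    · exfalso
      have : L.any (fun z => decide (x.length < z.length) && sub x z) = true := by
        unfold keepK at hk; simpa using hk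
      rcases List.any_eq_true.mp this with ⟨y, hyL, hy⟩
      have h1 : x.length < y.length := by
        have := hy; simp only [Bool.and_eq_true, decide_eq_true_eq] at this
        exact this.1
      have : y ∈ L.filter (fun z => decide (x.length < z.length)) :=
        List.mem_filter.mpr ⟨hyL, by simpa using h1⟩
      have : 0 < (L.filter (fun z => decide (x.length < z.length))).length :=
        List.length_pos_of_mem this
      omega
  | succ n ih =>
    intro x hm hx hcx
    by_cases hk : keepK L x = true
    · exact ⟨x, hx, hk, hcx⟩
    · have : L.any (fun z => decide (x.length < z.length) && sub x z) = true := by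
        unfold keepK at hk; simpa using hk
      rcases List.any_eq_true.mp this with ⟨y, hyL, hy⟩
      have hy' := hy
      simp only [Bool.and_eq_true, decide_eq_true_eq] at hy'
      have h1 : x.length < y.length := hy'.1
      have h2 : sub x y = true := hy'.2
      have hcy : sub c y = true :=
        sub_trans (c.length + x.length + y.length) c x y (le_refl _) hcx h2
      have hdec : (L.filter (fun z => decide (y.length < z.length))).length <
          (L.filter (fun z => decide (x.length < z.length))).length := by
        apply filter_len_lt _ _ L
        · intro z _ hz; simp at hz ⊢; omega
        · exact hyL
        · simpa using h1
        · simp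
      exact ih y (by omega) hyL hcy

-- the inner group fold is a filter
theorem foldl_if_filter (p : List Int → Bool) :
    ∀ (g acc : List (List Int)),
      g.foldl (fun temp c => if p c then temp else temp ++ [c]) acc
        = acc ++ g.filter (fun c => !(p c)) := by
  intro g
  induction g with
  | nil => intro acc; simp
  | cons a g ihg =>
    intro acc
    by_cases hp : p a = true
    · simp [List.foldl, hp, ihg, List.filter]
    · simp only [Bool.not_eq_true] at hp
      simp [List.foldl, hp, ihg, List.filter]

theorem any_congr_mem {α : Type} (p q : α → Bool) :
    ∀ (L : List α), (∀ a ∈ L, p a = q a) → L.any p = L.any q := by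
  intro L
  induction L with
  | nil => intro _; simp
  | cons a L ihl =>
    intro h
    simp only [List.any_cons, h a List.mem_cons_self,
      ihl (fun z hz => h z (List.mem_cons_of_mem a hz))]

theorem any_filter_kept (L : List (List Int)) (c : List Int) :
    ((L.filter (keepK L)).any (fun x => sub c x)) = (L.any (fun x => sub c x)) := by
  by_cases h : L.any (fun x => sub c x) = true
  · rcases List.any_eq_true.mp h with ⟨x, hxL, hx⟩
    rcases exists_kept L c (L.filter (fun z => decide (x.length < z.length))).length x
        (le_refl _) hxL hx with ⟨x', hx'L, hkx', hcx'⟩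
    rw [h]
    exact List.any_eq_true.mpr ⟨x', List.mem_filter.mpr ⟨hx'L, hkx'⟩, hcx'⟩
  · simp only [Bool.not_eq_true] at h
    rw [h]
    simp only [List.any_eq_false] at h ⊢
    intro x hx
    exact h x (List.mem_filter.mp hx).1

-- elements of the dropped suffix are strictly shorter than the run head
theorem dropWhile_lt (x : List Int) :
    ∀ (xs : List (List Int)),
      xs.Pairwise (fun a b => b.length ≤ a.length) →
      (∀ z ∈ xs, z.length ≤ x.length) →
      ∀ y ∈ xs.dropWhile (fun y => y.length == x.length), y.length < x.length := by
  intro xs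
  induction xs with
  | nil => intro _ _ y hy; simp [List.dropWhile] at hy
  | cons a as iha =>
    intro hpw hle y hy
    rw [List.pairwise_cons] at hpw
    by_cases hp : (a.length == x.length) = true
    · rw [List.dropWhile_cons, if_pos hp] at hy
      exact iha hpw.2 (fun z hz => hle z (List.mem_cons_of_mem a hz)) y hy
    · rw [List.dropWhile_cons, if_neg (by simpa using hp)] at hy
      have hane : a.length ≠ x.length := by simpa using hp
      have halt : a.length < x.length :=
        lt_of_le_of_ne (hle a List.mem_cons_self) hane
      rcases List.mem_cons.mp hy with rfl | hyas
      · exact halt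
      · exact lt_of_le_of_lt (hpw.1 y hyas) halt

-- main invariant: A's group loop starting from the kept part of `done` computes
-- B's filter over the whole list
theorem main_inv : ∀ (n : Nat) (rest : List (List Int)), rest.length ≤ n →
    ∀ (done : List (List Int)),
      (done ++ rest).Pairwise (fun a b => b.length ≤ a.length) →
      (∀ x ∈ done, ∀ y ∈ rest, y.length < x.length) →
      loopA (runs rest) (done.filter (keepK done))
        = (done ++ rest).filter (keepK (done ++ rest)) := by
  intro n
  induction n with
  | zero =>
    intro rest hlen done hpw _
    have : rest = [] := List.length_eq_zero_iff.mp (Nat.le_zero.mp hlen)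
    subst this
    simp [runs, loopA]
  | succ n ih =>
    intro rest hlen done hpw hsep
    match rest with
    | [] => simp [runs, loopA]
    | x :: xs =>
      have hpwrest : (x :: xs).Pairwise (fun a b => b.length ≤ a.length) :=
        (List.pairwise_append.mp hpw).2.1
      have hxbnd : ∀ z ∈ xs, z.length ≤ x.length :=
        (List.pairwise_cons.mp hpwrest).1
      set p : List Int → Bool := fun y => y.length == x.length with hp
      set g : List (List Int) := x :: xs.takeWhile p with hg
      set rest' : List (List Int) := xs.dropWhile p with hr
      have hsplit : g ++ rest' = x :: xs := by
        simp [hg, hr, List.takeWhile_append_dropWhile]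
      have hglen : ∀ cg ∈ g, cg.length = x.length := by
        intro cg hcg
        rcases List.mem_cons.mp hcg with rfl | h
        · rfl
        · have := List.mem_takeWhile_imp h
          rw [hp] at this
          simpa using this
      have hrest'lt : ∀ y ∈ rest', y.length < x.length :=
        dropWhile_lt x xs (List.pairwise_cons.mp hpwrest).2 hxbnd
      have hgmem : ∀ cg ∈ g, cg ∈ x :: xs := by
        intro cg hcg; rw [← hsplit]; exact List.mem_append_left _ hcg
      have hrmem : ∀ y ∈ rest', y ∈ x :: xs := by
        intro y hy; rw [← hsplit]; exact List.mem_append_right _ hy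
      -- step: unfold one iteration of the loop
      have hruns : runs (x :: xs) = g :: runs rest' := by
        rw [runs]
      have hstep : loopA (runs (x :: xs)) (done.filter (keepK done))
          = loopA (runs rest')
              (done.filter (keepK done) ++
                g.filter (fun c => !((done.filter (keepK done)).any (fun x => sub c x)))) := by
        rw [hruns]
        simp only [loopA, List.foldl_cons]
        rw [foldl_if_filter]
        simp
      rw [hstep]
      -- rewrite the new accumulator as (done ++ g).filter (keepK (done ++ g))
      have hshort : ∀ c ∈ g, ∀ z ∈ done, c.length < z.length := by
        intro c hc z hz
        have := hsep z hz c (hgmem c hc)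
        exact this
      have hGany : ∀ c, c ∈ g →
          g.any (fun t => decide (c.length < t.length) && sub c t) = false := by
        intro c hc
        simp only [List.any_eq_false]
        intro t ht
        have : t.length = c.length := (hglen t ht).trans (hglen c hc).symm
        simp [this]
      have hkeep_done : ∀ c ∈ done, keepK done c = keepK (done ++ g) c := by
        intro c hc
        unfold keepK
        rw [List.any_append]
        have : g.any (fun t => decide (c.length < t.length) && sub c t) = false := by
          simp only [List.any_eq_false]
          intro t ht
          have : t.length < c.length := hsep c hc t (hgmem t ht)
          simp; omega
        rw [this, Bool.or_false]
      have hkeep_g : ∀ c ∈ g,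
          (!((done.filter (keepK done)).any (fun x => sub c x))) = keepK (done ++ g) c := by
        intro c hc
        unfold keepK
        rw [List.any_append, hGany c hc, Bool.or_false]
        have hcs : ∀ z ∈ done, c.length < z.length := hshort c hc
        have h1 : done.any (fun t => decide (c.length < t.length) && sub c t)
            = done.any (fun t => sub c t) := by
          exact any_congr_mem _ _ done (fun t ht => by simp [hcs t ht])
        rw [h1, ← any_filter_kept done c]
        rfl
      have hacc : done.filter (keepK done) ++
            g.filter (fun c => !((done.filter (keepK done)).any (fun x => sub c x)))
          = (done ++ g).filter (keepK (done ++ g)) := by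
        rw [List.filter_append]
        congr 1
        · exact List.filter_congr hkeep_done
        · exact List.filter_congr hkeep_g
      rw [hacc]
      -- apply the induction hypothesis to rest'
      have hassoc : (done ++ g) ++ rest' = done ++ (x :: xs) := by
        rw [List.append_assoc, hsplit]
      have hlen' : rest'.length ≤ n := by
        have h1 : rest'.length ≤ xs.length := List.length_dropWhile_le _ _
        simp at hlen; omega
      have hpw' : ((done ++ g) ++ rest').Pairwise (fun a b => b.length ≤ a.length) := by
        rw [hassoc]; exact hpw
      have hsep' : ∀ z ∈ done ++ g, ∀ y ∈ rest', y.length < z.length := by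
        intro z hz y hy
        rcases List.mem_append.mp hz with hzd | hzg
        · exact hsep z hzd y (hrmem y hy)
        · rw [hglen z hzg]; exact hrest'lt y hy
      have := ih rest' hlen' (done ++ g) hpw' hsep'
      rw [this, hassoc]

-- ===== VERDICT (by name: the statement is the Claim_ definition above) =====
theorem find_maximal_spec : Claim_equal_find_maximal := by
  intro colocs _
  unfold Spec_find_maximal find_maximal find_maximal_alt
  set s := PySem.List.sorted colocs (fun x => (x.length : Int)) true with hs
  have hpw : s.Pairwise (fun a b => b.length ≤ a.length) := by
    have := PySem.List.sorted_pairwise_rev (xs := colocs) (key := fun x => ((x : List Int).length : Int))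
    rw [← hs] at this
    exact this.imp (by intro a b h; exact_mod_cast h)
  have := main_inv s.length s (le_refl _) [] (by simpa using hpw) (by simp)
  simp only [List.nil_append, List.filter_nil] at this
  show loopA (runs s) [] = _
  rw [this]
  rfl
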